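-- pv_equiv track=rewrite | github.com/MinChul-Son/for-Coding-Test | programmers/hash_level2-2.py | solution
-- ===== SOURCE A (Python) =====
-- def solution(clothes):
--     kinds =[]
--     answer = 1
--     for i in clothes:
--         count = 0
--         temp = []
--         for j in range(len(clothes)):
--             if i[1] == clothes[j][1]:
--                 count +=1
--         temp.append(count)
--         temp.append(i[1])
--         if kinds.count(temp) == 0:
--             kinds.append(temp)
--             answer = answer *(temp[0]+1)
--         else:
--             pass
--     answer = answer -1
--     return answer
-- ===== SOURCE B (Python) =====
-- def solution(clothes):
--     answer = 1
--     run = 0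
--     prev = None
--     for cat in sorted(c[1] for c in clothes):
--         if run and cat == prev:
--             run += 1
--         else:
--             answer *= run + 1
--             run = 1
--             prev = cat
--     return answer * (run + 1) - 1
-- ===== Notes on version B (the rewrite author's own statement) =====
-- stated objective: alternative
-- what changed: A rescans the whole list to count each item's category and dedups via kinds.count; B sorts the categories once and multiplies (run length + 1) for each run in one linear pass.
import Mathlib
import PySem

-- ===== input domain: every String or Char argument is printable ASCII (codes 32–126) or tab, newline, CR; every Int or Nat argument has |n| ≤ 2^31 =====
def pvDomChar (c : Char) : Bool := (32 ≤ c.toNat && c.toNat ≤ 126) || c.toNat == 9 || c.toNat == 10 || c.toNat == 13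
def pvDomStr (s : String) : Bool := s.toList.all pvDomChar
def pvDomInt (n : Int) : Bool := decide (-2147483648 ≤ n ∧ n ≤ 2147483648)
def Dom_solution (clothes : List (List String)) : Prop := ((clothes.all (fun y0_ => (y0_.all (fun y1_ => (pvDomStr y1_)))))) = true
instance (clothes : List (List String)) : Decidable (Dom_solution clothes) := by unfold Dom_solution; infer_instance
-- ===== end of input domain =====

-- B sorts the categories once and multiplies (run length + 1) per run instead of A's rescan-and-dedup loops (alternative algorithm); equivalence proved on inputs where A does not raise.


-- ===== PORT A =====
-- i[1] / clothes[j] / clothes[j][1] are ported with pyGetD; exact under Pre_solution (every inner list has length ≥ 2, every index in range)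
def solution (clothes : List (List String)) : Int :=
  let st := clothes.foldl
    (fun (st : List (Int × String) × Int) i =>
      let count : Int := (PySem.List.pyRange 0 (clothes.length : Int) 1).foldl
        (fun c j =>
          if PySem.List.pyGetD i 1 "" = PySem.List.pyGetD (PySem.List.pyGetD clothes j []) 1 "" then c + 1 else c) 0
      let temp : Int × String := (count, PySem.List.pyGetD i 1 "")
      if st.1.count temp = 0 then (st.1 ++ [temp], st.2 * (temp.1 + 1)) else st)
    ([], 1)
  st.2 - 1

-- ===== PORT B =====
-- c[1] ported with pyGetD; exact under Pre_solution
def solution_alt (clothes : List (List String)) : Int :=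
  let cats := PySem.List.sorted (clothes.map (fun c => PySem.List.pyGetD c 1 "")) (fun x => x) false
  let st := cats.foldl
    (fun (st : Int × Int × String) cat =>
      if st.2.1 ≠ 0 ∧ cat = st.2.2 then (st.1, st.2.1 + 1, st.2.2)
      else (st.1 * (st.2.1 + 1), 1, cat)) (1, 0, "")
  st.1 * (st.2.1 + 1) - 1

-- ===== PRECONDITION & SPEC =====
-- Pre_ excludes exactly the inputs on which Python A raises IndexError: an inner list with fewer than 2 elements (i[1]).
def Pre_solution (clothes : List (List String)) : Prop := ∀ c ∈ clothes, 2 ≤ c.length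
instance (clothes : List (List String)) : Decidable (Pre_solution clothes) := by unfold Pre_solution; infer_instance
def pvWitness_solution : List (List String) := [["a", "shirt"], ["b", "shirt"], ["c", "pants"]]
def Spec_solution (clothes : List (List String)) (out : Int) : Prop := out = solution_alt clothes
instance (clothes : List (List String)) (out : Int) : Decidable (Spec_solution clothes out) := by unfold Spec_solution; infer_instance

-- ===== CLAIM (what is proved, stated in full; the proofs are below) =====
def Claim_equal_solution : Prop := ∀ (clothes : List (List String)), Dom_solution clothes → Pre_solution clothes → Spec_solution clothes (solution clothes)

-- ===== LEMMAS AND PROOFS =====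

-- the category of one item, as both ports read it
def catOf (c : List String) : String := PySem.List.pyGetD c 1 ""

-- the product, over the distinct values of s, of (multiplicity in s + 1)
def P (s : List String) : Int := (s.dedup.map (fun y => (s.count y : Int) + 1)).prod

-- A's outer-loop body, with the inner counting loop already evaluated to a count
def stepA (cats : List String) (st : List (Int × String) × Int) (c : String) : List (Int × String) × Int :=
  let temp : Int × String := ((cats.count c : Int), c)
  if st.1.count temp = 0 then (st.1 ++ [temp], st.2 * (temp.1 + 1)) else st

-- B's loop body
def stepB (st : Int × Int × String) (cat : String) : Int × Int × String :=
  if st.2.1 ≠ 0 ∧ cat = st.2.2 then (st.1, st.2.1 + 1, st.2.2)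
  else (st.1 * (st.2.1 + 1), 1, cat)

-- the values of l not in seen, in first-occurrence order
def newD (seen : List String) : List String → List String
  | [] => []
  | c :: t => if c ∈ seen then newD seen t else c :: newD (seen ++ [c]) t

-- A's inner loop over range(len(clothes)) counts the occurrences of i's category
theorem countA (clothes : List (List String)) (i : List String) :
    ((PySem.List.pyRange 0 (clothes.length : Int) 1).foldl
      (fun c j =>
        if PySem.List.pyGetD i 1 "" = PySem.List.pyGetD (PySem.List.pyGetD clothes j []) 1 "" then c + 1 else c) 0)
    = ((clothes.map catOf).count (catOf i) : Int) := by
  rw [PySem.List.foldl_pyRange_zero_pyGetD' clothes ([] : List String)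
      (fun c x => if PySem.List.pyGetD i 1 "" = PySem.List.pyGetD x 1 "" then c + 1 else c) 0]
  rw [PySem.List.foldl_ite_add_one]
  simp [List.count, List.countP_map, catOf, Function.comp_def]
  apply List.countP_congr
  intro x _
  by_cases h : PySem.List.pyGetD i 1 "" = PySem.List.pyGetD x 1 ""
  · simp [h]
  · simp [h, Ne.symm h]

theorem mem_map_cnt (cats : List String) (seen : List String) (c : String) :
    (((cats.count c : Int), c) ∈ seen.map (fun y => ((cats.count y : Int), y))) ↔ c ∈ seen := by
  constructor
  · rintro h
    rcases List.mem_map.mp h with ⟨y, hy, he⟩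
    injection he with h1 h2
    subst h2; exact hy
  · intro h; exact List.mem_map.mpr ⟨c, h, rfl⟩

-- invariant of A's outer loop: the kinds list mirrors the seen categories, the answer the product so far
theorem Aloop (cats : List String) :
    ∀ (l : List String) (seen : List String) (a : Int),
      (l.foldl (stepA cats) (seen.map (fun y => ((cats.count y : Int), y)), a)).2
        = a * ((newD seen l).map (fun y => (cats.count y : Int) + 1)).prod := by
  intro l
  induction l with
  | nil => intro seen a; simp [newD]
  | cons c t ih =>
    intro seen a
    by_cases h : c ∈ seen
    · have hcnt : (seen.map (fun y => ((cats.count y : Int), y))).count ((cats.count c : Int), c) ≠ 0 := by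
        simp [List.count_eq_zero, mem_map_cnt, h]
      simp only [List.foldl_cons, stepA, hcnt, newD, if_pos h]
      exact ih seen a
    · have hcnt : (seen.map (fun y => ((cats.count y : Int), y))).count ((cats.count c : Int), c) = 0 := by
        rw [List.count_eq_zero]
        rw [mem_map_cnt]; exact h
      simp only [List.foldl_cons, stepA, hcnt, newD, if_neg h, if_true]
      rw [show seen.map (fun y => ((cats.count y : Int), y)) ++ [((cats.count c : Int), c)]
            = (seen ++ [c]).map (fun y => ((cats.count y : Int), y)) from by simp]
      rw [ih (seen ++ [c]) (a * ((cats.count c : Int) + 1))]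
      simp [List.prod_cons]
      ring

theorem newD_nodup_mem (l : List String) :
    ∀ seen, (newD seen l).Nodup ∧ ∀ x, x ∈ newD seen l ↔ x ∈ l ∧ x ∉ seen := by
  induction l with
  | nil => intro seen; simp [newD]
  | cons c t ih =>
    intro seen
    by_cases h : c ∈ seen
    · simp only [newD, if_pos h]
      obtain ⟨hn, hm⟩ := ih seen
      refine ⟨hn, fun x => ?_⟩
      rw [hm x]
      constructor
      · tauto
      · rintro ⟨hx, hs⟩
        rcases List.mem_cons.mp hx with rfl | hx
        · exact absurd h hs
        · exact ⟨hx, hs⟩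
    · simp only [newD, if_neg h]
      obtain ⟨hn, hm⟩ := ih (seen ++ [c])
      refine ⟨List.nodup_cons.mpr ⟨fun hc => by have := (hm c).mp hc; simp at this, hn⟩, fun x => ?_⟩
      rw [List.mem_cons, hm x]
      simp only [List.mem_append, List.mem_cons, List.not_mem_nil]
      by_cases hxc : x = c
      · subst hxc; tauto
      · tauto

theorem P_perm (s t : List String) (h : s.Perm t) : P s = P t := by
  unfold P
  have hc : ∀ y, s.count y = t.count y := fun y => h.count_eq y
  have hmap : ∀ l : List String,
      l.map (fun y => (s.count y : Int) + 1) = l.map (fun y => (t.count y : Int) + 1) := by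
    intro l; apply List.map_congr_left; intro y _; rw [hc]
  rw [hmap]
  exact (h.dedup.map _).prod_eq

theorem Pcons (x : String) (t : List String) :
    P (x :: t) = ((t.count x : Int) + 2) * P (t.filter (fun y => y ≠ x)) := by
  unfold P
  set t' := t.filter (fun y => y ≠ x) with ht'
  have hx' : x ∉ t'.dedup := by simp [ht', List.mem_filter]
  have hperm : (x :: t).dedup.Perm (x :: t'.dedup) := by
    rw [List.perm_ext_iff_of_nodup (List.nodup_dedup _) (List.nodup_cons.mpr ⟨hx', List.nodup_dedup _⟩)]
    intro y
    simp only [List.mem_dedup, List.mem_cons, ht', List.mem_filter]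
    by_cases hyx : y = x <;> simp [hyx]
  rw [((hperm.map (fun y => ((x :: t).count y : Int) + 1))).prod_eq]
  rw [List.map_cons, List.prod_cons]
  have h1 : ((x :: t).count x : Int) + 1 = (t.count x : Int) + 2 := by
    rw [List.count_cons_self]; push_cast; ring
  have h2 : t'.dedup.map (fun y => ((x :: t).count y : Int) + 1)
      = t'.dedup.map (fun y => (t'.count y : Int) + 1) := by
    apply List.map_congr_left
    intro y hy
    have hyx : y ≠ x := by
      rcases List.mem_dedup.mp hy with hyt'
      simpa [ht', List.mem_filter] using (List.mem_filter.mp hyt').2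
    rw [ht', List.count_filter]
    simp [Ne.symm hyx]
    simp [hyx]
  rw [h1, h2]

-- invariant of B's loop on a sorted list, inside a run of the category c of multiplicity r so far
theorem runB (s : List String) :
    s.Pairwise (· ≤ ·) →
    ∀ (a r : Int) (c : String), 1 ≤ r → (∀ x ∈ s, c ≤ x) →
      (s.foldl stepB (a, r, c)).1 * ((s.foldl stepB (a, r, c)).2.1 + 1)
        = a * ((s.count c : Int) + r + 1) * P (s.filter (fun y => y ≠ c)) := by
  induction s with
  | nil =>
    intro _ a r c _ _
    simp [P]
  | cons x t ih =>
    intro hp a r c hr hle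
    have hpt := (List.pairwise_cons.mp hp).2
    have hxt := (List.pairwise_cons.mp hp).1
    by_cases hxc : x = c
    · subst hxc
      have hstep : stepB (a, r, x) x = (a, r + 1, x) := by
        simp [stepB]; omega
      rw [List.foldl_cons, hstep]
      rw [ih hpt a (r + 1) x (by omega) hxt]
      rw [List.count_cons_self]
      have hf : (x :: t).filter (fun y => y ≠ x) = t.filter (fun y => y ≠ x) := by simp
      rw [hf]
      push_cast
      ring
    · have hcx : c < x := lt_of_le_of_ne (hle x (List.mem_cons_self)) (fun e => hxc e.symm)
      have hstep : stepB (a, r, c) x = (a * (r + 1), 1, x) := by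
        simp [stepB, hxc]
      rw [List.foldl_cons, hstep]
      rw [ih hpt (a * (r + 1)) 1 x (by omega) hxt]
      have hnc : ∀ y ∈ t, y ≠ c := by
        intro y hy e
        exact absurd (lt_of_lt_of_le hcx (hxt y hy)) (by rw [e]; exact lt_irrefl c)
      have hcount : (x :: t).count c = 0 := by
        rw [List.count_eq_zero]
        rintro h
        rcases List.mem_cons.mp h with rfl | h
        · exact hxc rfl
        · exact hnc c h rfl
      have hfilt : (x :: t).filter (fun y => y ≠ c) = x :: t := by
        rw [List.filter_eq_self]
        intro y hy
        rcases List.mem_cons.mp hy with rfl | hy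
        · simp [Ne.symm (ne_of_lt hcx)]
        · simp [hnc y hy]
      rw [hcount, hfilt, Pcons x t]
      push_cast
      ring

theorem Bres (s : List String) (hs : s.Pairwise (· ≤ ·)) :
    (s.foldl stepB (1, 0, "")).1 * ((s.foldl stepB (1, 0, "")).2.1 + 1) = P s := by
  cases s with
  | nil => simp [P]
  | cons x t =>
    have hstep : stepB (1, 0, "") x = (1, 1, x) := by simp [stepB]
    rw [List.foldl_cons, hstep]
    have hpt := (List.pairwise_cons.mp hs).2
    have hxt := (List.pairwise_cons.mp hs).1
    rw [runB t hpt 1 1 x le_rfl hxt, Pcons x t]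
    ring

theorem Aval (clothes : List (List String)) :
    solution clothes = P (clothes.map catOf) - 1 := by
  unfold solution
  have hbody : (fun (st : List (Int × String) × Int) (i : List String) =>
      let count : Int := (PySem.List.pyRange 0 (clothes.length : Int) 1).foldl
        (fun c j =>
          if PySem.List.pyGetD i 1 "" = PySem.List.pyGetD (PySem.List.pyGetD clothes j []) 1 "" then c + 1 else c) 0
      let temp : Int × String := (count, PySem.List.pyGetD i 1 "")
      if st.1.count temp = 0 then (st.1 ++ [temp], st.2 * (temp.1 + 1)) else st)
      = (fun st i => stepA (clothes.map catOf) st (catOf i)) := by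
    funext st i
    simp only [countA clothes i, stepA, catOf]
  rw [hbody]
  rw [← List.foldl_map]
  rw [show (([] : List (Int × String)), (1 : Int))
        = (([] : List String).map (fun y => (((clothes.map catOf).count y : Int), y)), (1 : Int)) from rfl]
  dsimp only
  rw [Aloop (clothes.map catOf) (clothes.map catOf) [] 1]
  obtain ⟨hn, hm⟩ := newD_nodup_mem (clothes.map catOf) []
  have hperm : (newD [] (clothes.map catOf)).Perm (clothes.map catOf).dedup := by
    rw [List.perm_ext_iff_of_nodup hn (List.nodup_dedup _)]
    intro y
    rw [hm y, List.mem_dedup]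
    simp
  rw [(hperm.map (fun y => (((clothes.map catOf).count y : Int) + 1))).prod_eq]
  unfold P
  ring

theorem Bval (clothes : List (List String)) :
    solution_alt clothes = P (clothes.map catOf) - 1 := by
  unfold solution_alt
  have hcat : (clothes.map (fun c => PySem.List.pyGetD c 1 "")) = clothes.map catOf := rfl
  rw [hcat]
  set s := PySem.List.sorted (clothes.map catOf) (fun x => x) false with hs
  have hsorted : s.Pairwise (· ≤ ·) := PySem.List.sorted_pairwise (clothes.map catOf) (fun x => x)
  have hfold : (fun (st : Int × Int × String) (cat : String) =>
      if st.2.1 ≠ 0 ∧ cat = st.2.2 then (st.1, st.2.1 + 1, st.2.2)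
      else (st.1 * (st.2.1 + 1), 1, cat)) = stepB := rfl
  rw [hfold]
  dsimp only
  rw [show (s.foldl stepB (1, 0, "")).1 * ((s.foldl stepB (1, 0, "")).2.1 + 1) - 1
        = P s - 1 from by rw [Bres s hsorted]]
  rw [P_perm s (clothes.map catOf) (PySem.List.sorted_perm _ _ _)]

-- ===== VERDICT (by name: the statement is the Claim_ definition above) =====
theorem solution_spec : Claim_equal_solution := by
  intro clothes _ _
  unfold Spec_solution
  rw [Aval, Bval]
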